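-- pv_equiv track=rewrite | github.com/PoppaShell/money-mapper | src/money_mapper/ml_categorizer.py | fallback_to_mapping
-- ===== SOURCE A (Python) =====
-- def fallback_to_mapping(
--     merchant: str, mappings: dict[str, dict[str, str]]
-- ) -> dict[str, str] | None:
--     """
--     Fallback to mapping rules if ML confidence is too low.
--
--     Args:
--         merchant: Merchant name to look up
--         mappings: Dictionary of merchant mappings
--
--     Returns:
--         Mapping if found, None otherwise
--     """
--     merchant_lower = merchant.lower()
--
--     # Try exact match first
--     for key, mapping in mappings.items():
--         if key.lower() == merchant_lower:
--             return mapping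
--
--     # Try substring match
--     for key, mapping in mappings.items():
--         if key.lower() in merchant_lower or merchant_lower in key.lower():
--             return mapping
--
--     return None
-- ===== SOURCE B (Python) =====
-- def fallback_to_mapping(merchant, mappings):
--     """Single pass: return first exact match immediately; remember the first
--     substring match as a fallback and return it (or None) after the loop."""
--     merchant_lower = merchant.lower()
--     fallback = None
--     for key, mapping in mappings.items():
--         key_lower = key.lower()
--         if key_lower == merchant_lower:
--             return mapping
--         if fallback is None and (key_lower in merchant_lower or merchant_lower in key_lower):
--             fallback = mapping
--     return fallback
-- ===== Notes on version B (the rewrite author's own statement) =====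
-- stated objective: alternative
-- what changed: Replaces A's two sequential scans over mappings.items() with a single pass that returns on the first exact match and carries the first substring match as a fallback, computing each key.lower() once per key.
import Mathlib
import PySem

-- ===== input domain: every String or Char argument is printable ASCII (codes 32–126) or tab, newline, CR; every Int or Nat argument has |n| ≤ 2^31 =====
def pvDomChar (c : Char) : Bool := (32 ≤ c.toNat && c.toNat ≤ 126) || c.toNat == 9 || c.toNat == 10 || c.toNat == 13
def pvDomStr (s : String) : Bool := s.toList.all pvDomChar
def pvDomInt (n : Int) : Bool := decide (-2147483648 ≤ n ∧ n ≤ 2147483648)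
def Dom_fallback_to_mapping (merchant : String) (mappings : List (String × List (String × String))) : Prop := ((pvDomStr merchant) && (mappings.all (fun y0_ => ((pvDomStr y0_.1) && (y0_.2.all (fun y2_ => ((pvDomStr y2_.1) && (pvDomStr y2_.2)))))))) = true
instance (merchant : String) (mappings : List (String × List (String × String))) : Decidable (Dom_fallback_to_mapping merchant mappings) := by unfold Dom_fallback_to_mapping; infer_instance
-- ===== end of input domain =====

-- B merges A's two scans into one pass carrying the first substring match as a fallback (objective: alternative decomposition, same cost).

-- ===== PORT A =====
-- first loop of A: exact match on lowered keys
def fmExactA (ml : String) : List (String × List (String × String)) → Option (List (String × String))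
  | [] => none
  | (key, mapping) :: rest =>
    if PySem.Str.lower key == ml then some mapping else fmExactA ml rest

-- second loop of A: substring match either way
def fmSubA (ml : String) : List (String × List (String × String)) → Option (List (String × String))
  | [] => none
  | (key, mapping) :: rest =>
    if PySem.Str.isIn (PySem.Str.lower key) ml || PySem.Str.isIn ml (PySem.Str.lower key) then
      some mapping
    else fmSubA ml rest

def fallback_to_mapping (merchant : String) (mappings : List (String × List (String × String))) : Option (List (String × String)) :=
  let merchant_lower := PySem.Str.lower merchant
  match fmExactA merchant_lower mappings with
  | some mapping => some mapping
  | none => fmSubA merchant_lower mappings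

-- ===== PORT B =====
-- B's single loop: return on exact match, carry first substring match in `fallback`
def fmLoopB (ml : String) (fallback : Option (List (String × String))) :
    List (String × List (String × String)) → Option (List (String × String))
  | [] => fallback
  | (key, mapping) :: rest =>
    let kl := PySem.Str.lower key
    if kl == ml then some mapping
    else
      fmLoopB ml
        (if fallback.isNone && (PySem.Str.isIn kl ml || PySem.Str.isIn ml kl) then some mapping
         else fallback) rest

def fallback_to_mapping_alt (merchant : String) (mappings : List (String × List (String × String))) : Option (List (String × String)) :=
  fmLoopB (PySem.Str.lower merchant) none mappings

-- ===== PRECONDITION & SPEC =====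
def Spec_fallback_to_mapping (merchant : String) (mappings : List (String × List (String × String))) (out : Option (List (String × String))) : Prop := out = fallback_to_mapping_alt merchant mappings
instance (merchant : String) (mappings : List (String × List (String × String))) (out : Option (List (String × String))) : Decidable (Spec_fallback_to_mapping merchant mappings out) := by unfold Spec_fallback_to_mapping; infer_instance

-- ===== CLAIM (what is proved, stated in full; the proofs are below) =====
def Claim_equal_fallback_to_mapping : Prop := ∀ (merchant : String) (mappings : List (String × List (String × String))), Dom_fallback_to_mapping merchant mappings → Spec_fallback_to_mapping merchant mappings (fallback_to_mapping merchant mappings)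

-- ===== LEMMAS AND PROOFS =====
-- loop invariant: B's single pass equals exact-scan, then the carried fallback, then the substring-scan
theorem fmLoopB_eq (ml : String) (fb : Option (List (String × String)))
    (xs : List (String × List (String × String))) :
    fmLoopB ml fb xs =
      match fmExactA ml xs with
      | some m => some m
      | none => match fb with
        | some f => some f
        | none => fmSubA ml xs := by
  induction xs generalizing fb with
  | nil => cases fb <;> simp [fmLoopB, fmExactA, fmSubA]
  | cons p rest ih =>
    obtain ⟨key, mapping⟩ := p
    by_cases hx : PySem.Str.lower key == ml
    · simp [fmLoopB, fmExactA, hx]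
    · cases fb with
      | some f =>
        simp [fmLoopB, fmExactA, hx, ih]
      | none =>
        by_cases hs : PySem.Chars.isIn (PySem.Chars.lower key.toList) ml.toList = true ∨
            PySem.Chars.isIn ml.toList (PySem.Chars.lower key.toList) = true <;>
          simp [fmLoopB, fmExactA, fmSubA, hx, hs, ih]

-- ===== VERDICT (by name: the statement is the Claim_ definition above) =====
theorem fallback_to_mapping_spec : Claim_equal_fallback_to_mapping := by
  intro merchant mappings _
  unfold Spec_fallback_to_mapping fallback_to_mapping fallback_to_mapping_alt
  rw [fmLoopB_eq]
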